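-- pv_equiv track=rewrite | github.com/Maridan8/Crypto-Price-Prediction | Features/indicators/rsi.py | count_bellow_candle
-- ===== SOURCE A (Python) =====
-- def count_bellow_candle(l, period, value):
--     counts = [0] * len(l)
--     for i in range(period, len(l)):
--         count = 0
--         for j in range(i-period, i):
--             if l[j] < value:
--                 count += 1
--         counts[i] = count
--
--     return counts
-- ===== SOURCE B (Python) =====
-- def count_bellow_candle(l, period, value):
--     n = len(l)
--     if period <= 0:
--         return [0] * n
--     counts = [0] * min(period, n)
--     c = sum(1 for x in l[:period] if x < value)
--     for i in range(period, n):
--         counts.append(c)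
--         c += (l[i] < value) - (l[i - period] < value)
--     return counts
-- ===== Notes on version B (the rewrite author's own statement) =====
-- stated objective: faster
-- what changed: Replaces the O(n*period) rescan of each window by an O(n) sliding-window count: one running counter updated by the entering and leaving element, output built by appending.
import Mathlib
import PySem

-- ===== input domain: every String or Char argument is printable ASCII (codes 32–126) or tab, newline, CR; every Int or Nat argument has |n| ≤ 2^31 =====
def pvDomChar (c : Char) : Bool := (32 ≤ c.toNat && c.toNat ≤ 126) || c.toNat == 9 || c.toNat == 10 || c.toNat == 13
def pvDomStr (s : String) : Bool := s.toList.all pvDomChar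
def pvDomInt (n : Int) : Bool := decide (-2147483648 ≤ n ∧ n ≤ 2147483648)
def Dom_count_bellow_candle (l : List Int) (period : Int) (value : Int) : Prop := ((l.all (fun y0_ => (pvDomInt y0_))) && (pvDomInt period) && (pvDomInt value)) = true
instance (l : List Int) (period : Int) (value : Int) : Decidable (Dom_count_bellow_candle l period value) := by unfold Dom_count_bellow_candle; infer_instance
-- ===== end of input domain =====

-- B replaces A's per-index rescan of the window by a single sliding-window counter (one pass); proved equal on every input where A returns.


-- ===== PORT A =====
def count_bellow_candle (l : List Int) (period : Int) (value : Int) : List Int :=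
  (PySem.List.pyRange period (PySem.List.len l) 1).foldl
    (fun counts i =>
      let count : Int := (PySem.List.pyRange (i - period) i 1).foldl
        (fun count j => if PySem.List.pyGetD l j 0 < value then count + 1 else count) 0
      PySem.List.pySetD counts i count)
    (List.replicate l.length 0)

-- ===== PORT B =====
def count_bellow_candle_alt (l : List Int) (period : Int) (value : Int) : List Int :=
  let n : Int := PySem.List.len l
  if period ≤ 0 then List.replicate l.length 0
  else
    let c0 : Int := ((PySem.List.slice l none (some period)).countP (fun x => x < value) : Int)
    let st := (PySem.List.pyRange period n 1).foldl
      (fun (st : List Int × Int) i =>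
        (st.1 ++ [st.2],
         st.2 + (if PySem.List.pyGetD l i 0 < value then (1:Int) else 0)
              - (if PySem.List.pyGetD l (i - period) 0 < value then (1:Int) else 0)))
      (List.replicate (min period n).toNat 0, c0)
    st.1

-- ===== PRECONDITION & SPEC =====
-- Pre_ excludes exactly the inputs where A raises IndexError (the write counts[i] with i = period < -len(l)).
def Pre_count_bellow_candle (l : List Int) (period : Int) (value : Int) : Prop :=
  -(l.length : Int) ≤ period
instance (l : List Int) (period : Int) (value : Int) : Decidable (Pre_count_bellow_candle l period value) := by unfold Pre_count_bellow_candle; infer_instance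
def pvWitness_count_bellow_candle : List Int × Int × Int := ([1, 3, 2, 0], 2, 2)

def Spec_count_bellow_candle (l : List Int) (period : Int) (value : Int) (out : List Int) : Prop := out = count_bellow_candle_alt l period value
instance (l : List Int) (period : Int) (value : Int) (out : List Int) : Decidable (Spec_count_bellow_candle l period value out) := by unfold Spec_count_bellow_candle; infer_instance

-- ===== CLAIM (what is proved, stated in full; the proofs are below) =====
def Claim_equal_count_bellow_candle : Prop := ∀ (l : List Int) (period : Int) (value : Int), Dom_count_bellow_candle l period value → Pre_count_bellow_candle l period value → Spec_count_bellow_candle l period value (count_bellow_candle l period value)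


-- ===== LEMMAS AND PROOFS =====

-- window count: how many j in [a, b) have l[j] < value
def pvW (l : List Int) (value a b : Int) : Int :=
  ((PySem.List.pyRange a b 1).countP (fun j => PySem.List.pyGetD l j 0 < value) : Int)

-- the indicator of a single index
def pvInd (l : List Int) (value j : Int) : Int :=
  if PySem.List.pyGetD l j 0 < value then 1 else 0

lemma pvW_cons (l : List Int) (value a b : Int) (h : a < b) :
    pvW l value a b = pvInd l value a + pvW l value (a+1) b := by
  unfold pvW pvInd
  rw [PySem.List.pyRange_one_cons h]
  simp [List.countP_cons]
  split_ifs <;> omega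

lemma pvW_succ (l : List Int) (value a b : Int) (h : a ≤ b) :
    pvW l value a (b+1) = pvW l value a b + pvInd l value b := by
  unfold pvW pvInd
  rw [PySem.List.pyRange_one_succ_right h]
  simp [List.countP_append, List.countP_cons]

lemma pvInner (l : List Int) (value a b : Int) :
    (PySem.List.pyRange a b 1).foldl
      (fun count j => if PySem.List.pyGetD l j 0 < value then count + 1 else count) 0
    = pvW l value a b := by
  unfold pvW
  have := PySem.List.foldl_count_if (fun j => decide (PySem.List.pyGetD l j 0 < value))
    (PySem.List.pyRange a b 1) 0
  simpa using this

lemma pvSetZero (n : Nat) (i : Int) :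
    PySem.List.pySetD (List.replicate n (0:Int)) i 0 = List.replicate n 0 := by
  unfold PySem.List.pySetD PySem.List.pySet?
  cases PySem.List.pyIdx? (List.replicate n (0:Int)).length i <;>
    simp [List.set_replicate_self]

lemma pvMapTake (l : List Int) (p : Nat) (hp : p ≤ l.length) :
    (PySem.List.pyRange 0 (p:Int) 1).map (fun j => PySem.List.pyGetD l j 0) = l.take p := by
  induction p with
  | zero => simp [PySem.List.pyRange_one_eq_nil]
  | succ p ih =>
    have h1 : ((p:Int)+1) = ((p+1 : Nat) : Int) := by push_cast; ring
    rw [show ((p+1:Nat):Int) = (p:Int)+1 by push_cast; ring,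
      PySem.List.pyRange_one_succ_right (by positivity)]
    rw [List.map_append, ih (by omega), List.take_add_one]
    have : l[p]? = some l[p] := List.getElem?_eq_getElem (by omega)
    simp [this, PySem.List.pyGetD_natCast, List.getD_eq_getElem?_getD]

-- initial counter of B equals the window count of the first window
lemma pvInit (l : List Int) (period value : Int) (h0 : 0 < period) (hn : period ≤ (l.length : Int)) :
    ((PySem.List.slice l none (some period)).countP (fun x => x < value) : Int)
      = pvW l value 0 period := by
  unfold pvW
  rw [PySem.List.slice_to l (le_of_lt h0), ← pvMapTake l period.toNat (by omega),
    List.countP_map, show ((period.toNat : Int)) = period by omega]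
  rfl

-- the combined loop invariant for both folds, over the range [period, period+k)
lemma pvMain (l : List Int) (period value : Int) (k : Nat)
    (h0 : 0 < period) (hk : period + k ≤ (l.length : Int)) :
    ((PySem.List.pyRange period (period + k) 1).foldl
      (fun counts i =>
        let count : Int := (PySem.List.pyRange (i - period) i 1).foldl
          (fun count j => if PySem.List.pyGetD l j 0 < value then count + 1 else count) 0
        PySem.List.pySetD counts i count)
      (List.replicate l.length 0)
      = List.replicate period.toNat 0
        ++ (PySem.List.pyRange period (period + k) 1).map (fun i => pvW l value (i - period) i)
        ++ List.replicate (l.length - period.toNat - k) 0)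
    ∧ ((PySem.List.pyRange period (period + k) 1).foldl
      (fun (st : List Int × Int) i =>
        (st.1 ++ [st.2],
         st.2 + (if PySem.List.pyGetD l i 0 < value then (1:Int) else 0)
              - (if PySem.List.pyGetD l (i - period) 0 < value then (1:Int) else 0)))
      (List.replicate period.toNat 0, pvW l value 0 period)
      = (List.replicate period.toNat 0
          ++ (PySem.List.pyRange period (period + k) 1).map (fun i => pvW l value (i - period) i),
         pvW l value k (period + k))) := by
  induction k with
  | zero =>
    have he : PySem.List.pyRange period (period + (0:Nat)) 1 = [] :=
      PySem.List.pyRange_one_eq_nil (by omega)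
    constructor
    · rw [he]; simp
      omega
    · rw [he]; simp
  | succ k ih =>
    have hk' : period + k ≤ (l.length : Int) := by push_cast at hk ⊢; omega
    obtain ⟨ihA, ihB⟩ := ih hk'
    have hsplit : PySem.List.pyRange period (period + (k+1:Nat)) 1
        = PySem.List.pyRange period (period + k) 1 ++ [period + k] := by
      rw [show (period + (k+1:Nat)) = (period + k) + 1 by push_cast; ring]
      exact PySem.List.pyRange_one_succ_right (by omega)
    constructor
    · rw [hsplit, List.foldl_append, ihA, List.map_append, List.foldl_cons, List.foldl_nil]
      rw [pvInner]
      have hlen : (List.replicate period.toNat (0:Int)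
          ++ (PySem.List.pyRange period (period + k) 1).map (fun i => pvW l value (i - period) i)).length
          = period.toNat + k := by
        simp [PySem.List.length_pyRange_one]
      have hrep : List.replicate (l.length - period.toNat - k) (0:Int)
          = 0 :: List.replicate (l.length - period.toNat - (k+1)) 0 := by
        rw [show l.length - period.toNat - k = (l.length - period.toNat - (k+1)) + 1 by omega]
        simp [List.replicate_succ]
      rw [PySem.List.pySetD_of_nonneg _ _ (by omega), hrep]
      rw [show ((period + (k:Int)).toNat) = period.toNat + k by omega]
      rw [List.append_assoc, ← hlen]
      rw [show (List.replicate period.toNat (0:Int)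
          ++ ((PySem.List.pyRange period (period + k) 1).map (fun i => pvW l value (i - period) i)
            ++ (0 :: List.replicate (l.length - period.toNat - (k+1)) 0)))
        = (List.replicate period.toNat (0:Int)
          ++ (PySem.List.pyRange period (period + k) 1).map (fun i => pvW l value (i - period) i))
          ++ (0 :: List.replicate (l.length - period.toNat - (k+1)) 0) by simp]
      rw [List.set_append]
      simp only [lt_irrefl, Nat.sub_self]
      simp [List.set_cons_zero]
    · rw [hsplit, List.foldl_append, ihB, List.foldl_cons, List.foldl_nil]
      simp only [Prod.mk.injEq]
      constructor
      · simp
      · show pvW l value k (period + k)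
            + (if PySem.List.pyGetD l (period + k) 0 < value then (1:Int) else 0)
            - (if PySem.List.pyGetD l (period + k - period) 0 < value then (1:Int) else 0)
          = pvW l value (k+1) (period + (k+1:Nat))
        have e1 : pvW l value k (period + k + 1)
            = pvW l value k (period + k) + pvInd l value (period + k) :=
          pvW_succ l value k (period + k) (by omega)
        have e2 : pvW l value k (period + k + 1)
            = pvInd l value k + pvW l value (k+1) (period + k + 1) :=
          pvW_cons l value k (period + k + 1) (by omega)
        have e3 : period + k - period = (k:Int) := by ring
        rw [show (period + (k+1:Nat)) = period + k + 1 by push_cast; ring]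
        unfold pvInd at e1 e2
        rw [e3]
        omega

-- the whole loop is a no-op when period ≤ 0 (every window is empty, every write writes 0)
lemma pvNonpos (l : List Int) (period value : Int) (h : period ≤ 0) (r : List Int) :
    r.foldl
      (fun counts i =>
        let count : Int := (PySem.List.pyRange (i - period) i 1).foldl
          (fun count j => if PySem.List.pyGetD l j 0 < value then count + 1 else count) 0
        PySem.List.pySetD counts i count)
      (List.replicate l.length 0) = List.replicate l.length 0 := by
  induction r with
  | nil => rfl
  | cons i r ih =>
    rw [List.foldl_cons]
    have he : PySem.List.pyRange (i - period) i 1 = [] :=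
      PySem.List.pyRange_one_eq_nil (by omega)
    simp only [he, List.foldl_nil, pvSetZero]
    exact ih

-- ===== VERDICT (by name: the statement is the Claim_ definition above) =====
theorem count_bellow_candle_spec : Claim_equal_count_bellow_candle := by
  intro l period value _ hpre
  unfold Spec_count_bellow_candle count_bellow_candle count_bellow_candle_alt
  by_cases h0 : period ≤ 0
  · simp only [if_pos h0, PySem.List.len_eq]
    exact pvNonpos l period value h0 _
  · rw [not_le] at h0
    simp only [if_neg (not_le.mpr h0), PySem.List.len_eq]
    by_cases hn : period ≤ (l.length : Int)
    · have hmin : (min period (l.length : Int)).toNat = period.toNat := by omega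
      set k := ((l.length : Int) - period).toNat with hkdef
      have hkn : period + (k:Int) = (l.length : Int) := by omega
      obtain ⟨hA, hB⟩ := pvMain l period value k h0 (by omega)
      rw [hkn] at hA hB
      rw [hA]
      rw [hmin, pvInit l period value h0 hn, hB]
      have : l.length - period.toNat - k = 0 := by omega
      simp [this]
    · rw [not_le] at hn
      have he : PySem.List.pyRange period (l.length : Int) 1 = [] :=
        PySem.List.pyRange_one_eq_nil (by omega)
      have hmin : (min period (l.length : Int)).toNat = l.length := by omega
      rw [he]
      simp [hmin]
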